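/- GENERATED by mk_final_copies.py from the proof of the farm's unit `vorbis_pump_first_frame` (farm:vorbis_pump_first_frame.1: Proof.lean) as the
   re-elaboration sweep compiled it — do not edit. -/
import Asan.CheckWalk
import Vorbis.Spec.Units.vorbis_pump_first_frame
import Vorbis.Spec.Worked.vorbis_pump_first_frame_Lemmas

/-!
  `vorbis_pump_first_frame` (0x113840, 34 instructions; stb_vorbis_fixed.c 3537–3543) satisfies its contract.

  A PROTECTED frame: the prologue poisons the red zones around `len`, `right`, `left` (three inline shadow stores), the single
  epilogue zeroes them. The pure facts — the prologue's / epilogue's stores are `storesMem … prologue / epilogue` of the layout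
  (`ShadowInv.prologue_ra`, `.epilogue_ra`), the decode-time invariant over stack and shadow stores (`DecodeInv.carry`), the three
  frame objects, W3 ⇒ W3′ — are in work/Lemmas.lean; this file holds the walk.

      entry   … 0x113899   prologue, `call vorbis_decode_packet` with the function's own frame pushed on the frame list
      0x11389e (cut1)      after the call: stack slots, footprint, the callee's post; `test eax, eax`
      res ≠ 0 … 0x1138d3   the three loads, `call vorbis_finish_frame` (W3′ from W3); 0x1138d8 (cut2) `jmp` to the epilogue
      0x1138a4 … ret       the epilogue's two shadow stores, `add rsp`, three pops, `ret` (both paths)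
-/

open X86 X86.User Asan Vorbis Vorbis.Spec

set_option maxRecDepth 4000
set_option maxHeartbeats 4000000

namespace Vorbis.Spec.vorbis_pump_first_frame

/-- **Where the arena is**, as one arithmetic fact for the frame tactics: above the image's text (`Hand.arenaText`), below the
shadow (AR1), off the stack region (AR1x). It is a window of both callees' footprints; the stack slots are read through it. -/
theorem arena_where {others : List Obj} {frames : List (Nat × FrameLayout)} {len : Nat} {A : Arena} {stored room : Int}
    {ysz : Nat → Nat} {mem : Mem} {f : Nat} (hinv : DecodeInv others frames len A stored room ysz mem f) :
    0x119d40 ≤ A.B ∧ A.B + A.L ≤ 0xC00000 ∧ (A.B + A.L ≤ 0x700000 ∨ 0x800000 ≤ A.B) := by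
  have h1 := hinv.arena.AR1
  have h2 := hinv.arena.AR1x
  have h3 : L.textHi ≤ A.B := hinv.arenaText
  have e : L.textHi = 0x119d40 := rfl
  omega

end Vorbis.Spec.vorbis_pump_first_frame

/-- `vorbis_pump_first_frame` satisfies its contract: the protected-frame prologue, a call of vorbis_decode_packet with the three
frame objects as out-pointers, on a non-zero result a call of vorbis_finish_frame, the single epilogue. -/
theorem Vorbis.Spec.Worked.vorbis_pump_first_frame_ok : Vorbis.Spec.vorbis_pump_first_frame.Statement := by
  intro Lay hLay μ hμ u₀ hcode h_dp h_ff others frames len A stored room ysz u ret he hpre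
  v_entry he
  obtain ⟨hsh, hinv⟩ := hpre
  have hsp := hsh.rsp
  -- the callees' contracts, for the frame list with the function's own frame (at RA − 120) in front
  have hdp := h_dp others (((u.reg .rsp).toNat - 120, Vorbis.Frames.vorbis_pump_first_frame) :: frames) len A stored room ysz
  have hff := h_ff others (((u.reg .rsp).toNat - 120, Vorbis.Frames.vorbis_pump_first_frame) :: frames) len A stored room ysz
  -- where the arena is: above the text, below the shadow, off the stack region
  have harena := Vorbis.Spec.vorbis_pump_first_frame.arena_where hinv
  -- 0x113840 … 0x113899: the prologue and `call vorbis_decode_packet` (stb_vorbis_fixed.c:3537, 3539)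
  u_walk hcode [hμ.vendor] until [Vorbis.L.vorbis_pump_first_frame.cut1] span [Vorbis.L.textLo, Vorbis.L.textHi] side (v_side)
  case call_inv =>
    v_inv
  case pre_113899 =>
    -- vorbis_decode_packet's precondition: the layer after the prologue, the invariant carried, the three frame objects
    have e_rsp : (s_113899.reg .rsp).toNat + 8 = (u.reg .rsp).toNat - 120 := by
      rw [w_rsp]
      u_omega
    have hinv1 : ShadowInv others (((u.reg .rsp).toNat - 120, Vorbis.Frames.vorbis_pump_first_frame) :: frames)
        ((u.reg .rsp).toNat - 120) s_113899.mem := by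
      rw [w_mem]
      exact Vorbis.Spec.vorbis_pump_first_frame.prologue_inv _ _ _ _ hsh.inv he_room he_align
    have hsame1 : Mem.SameExcept [⟨(u.reg .rsp).toNat - 4176, (u.reg .rsp).toNat⟩, ⟨0xC00000, 0xE00000⟩] u.mem
        s_113899.mem := by
      u_same
    have e_rdi : s_113899.reg .rdi = u.reg .rdi := w_kept.get .rdi rfl
    have e_rsi : (s_113899.reg .rsi).toNat = (u.reg .rsp).toNat - 120 + 32 := by
      rw [w_rsi]
      u_omega
    have e_rdx : (s_113899.reg .rdx).toNat = (u.reg .rsp).toNat - 120 + 64 := by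
      rw [w_rdx]
      u_omega
    have e_rcx : (s_113899.reg .rcx).toNat = (u.reg .rsp).toNat - 120 + 48 := by
      rw [w_rcx]
      u_omega
    refine ⟨⟨?_, hsh.offText⟩, ?_, ?_, ?_, ?_, ?_⟩
    · rw [e_rsp]
      exact hinv1
    · rw [e_rdi]
      exact Vorbis.Spec.vorbis_pump_first_frame.carry_stack_shadow hinv hsh.inv (by omega) (by omega) hsame1 hinv1
    · rw [e_rsi]
      exact ⟨Vorbis.Spec.vorbis_pump_first_frame.live_len _ _ _, by omega, by omega⟩
    · rw [e_rdx]
      exact ⟨Vorbis.Spec.vorbis_pump_first_frame.live_left _ _ _, by omega, by omega⟩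
    · rw [e_rcx]
      exact ⟨Vorbis.Spec.vorbis_pump_first_frame.live_right _ _ _, by omega, by omega⟩
    · rw [e_rsi, e_rdx, e_rcx]
      unfold Top.Apart4 Top.RangesApart
      simp only [List.pairwise_cons, List.mem_cons, List.not_mem_nil, or_false, forall_eq_or_imp, forall_eq,
        List.Pairwise.nil, and_true, false_imp_iff, implies_true]
      omega
  -- 0x11389e (cut1): vorbis_decode_packet has returned (stb_vorbis_fixed.c:3539 `res = …`)
  -- `rbx = base >> 3` as a variable `b` with two bounds (`IsBase` keeps the shift away from `u_omega`)
  obtain ⟨b, hbdef, hb1, hb2⟩ : ∃ b : Word, Vorbis.Spec.vorbis_pump_first_frame.IsBase (u.reg .rsp) b ∧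
      0xE0000 ≤ b.toNat ∧ b.toNat < 0x100000 :=
    ⟨_, rfl, Vorbis.Spec.vorbis_pump_first_frame.isBase_bounds _ he_room he_top⟩
  have eb : (u.reg .rsp - 120) >>> 3 = b := hbdef
  rw [eb] at w_rbx w_mem_113899 w_rbx_113899 w_has_11386c w_has_113876 w_has_113880
  clear eb
  -- the callee's footprint as numbers over the entry state (its windows mention rsi, rdx, rcx: the three frame objects)
  v_after_call w_rsp_113899 w_mem_113899
  simp only [w_rsi_113899, w_rdx_113899, w_rcx_113899] at w_same
  have c_rdi : s_113899.reg .rdi = u.reg .rdi := w_kept_113899.get .rdi rfl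
  -- the three saved registers and the return address: read before the call, carried through the callee's footprint
  have hp1 : UInt64.ofNat (s_113899.mem.readLE (u.reg .rsp - 8) 8) = u.reg .r12 := by u_resolve
  have hp2 : UInt64.ofNat (s_113899.mem.readLE (u.reg .rsp - 16) 8) = u.reg .rbp := by u_resolve
  have hp3 : UInt64.ofNat (s_113899.mem.readLE (u.reg .rsp - 24) 8) = u.reg .rbx := by u_resolve
  have hp0 : UInt64.ofNat (s_113899.mem.readLE (u.reg .rsp) 8) = ret := by u_resolve
  rw [w_mem_113899] at hp1 hp2 hp3 hp0
  have hs1 : UInt64.ofNat (s_113899r.mem.readLE (u.reg .rsp - 8) 8) = u.reg .r12 := by u_frame hp1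
  have hs2 : UInt64.ofNat (s_113899r.mem.readLE (u.reg .rsp - 16) 8) = u.reg .rbp := by u_frame hp2
  have hs3 : UInt64.ofNat (s_113899r.mem.readLE (u.reg .rsp - 24) 8) = u.reg .rbx := by u_frame hp3
  have hs0 : UInt64.ofNat (s_113899r.mem.readLE (u.reg .rsp) 8) = ret := by u_frame hp0
  clear hp1 hp2 hp3 hp0
  -- this function's own footprint so far
  have hsame : Mem.SameExcept [⟨(u.reg .rsp).toNat - 4176, (u.reg .rsp).toNat⟩, ⟨A.B, A.B + A.L⟩, ⟨0xC00000, 0xE00000⟩]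
      u.mem s_113899r.mem := by
    u_same
  -- the callee's post: the layer (own frame still pushed), the invariant, W3 for (len, left, right) if res ≠ 0
  obtain ⟨hinv2, hdec2, hw3⟩ := w_post
  rw [w_rsp] at hinv2
  rw [c_rdi] at hdec2 hw3
  rw [w_rsi_113899, w_rdx_113899, w_rcx_113899] at hw3
  obtain ⟨z, w_rax⟩ : ∃ z, s_113899r.reg .rax = z := ⟨_, rfl⟩
  rw [w_rax] at hw3
  have e120 : (u.reg .rsp - 120).toNat = (u.reg .rsp).toNat - 120 :=
    Vorbis.Spec.vorbis_pump_first_frame.toNat_sub120 _ (by omega)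
  rw [e120] at hinv2
  clear e120
  -- 0x11389e … : `if (res)` (stb_vorbis_fixed.c:3540); res ≠ 0: up to `call vorbis_finish_frame` (3541); res = 0: to the `ret`
  u_walk hcode [hμ.vendor] until [Vorbis.L.vorbis_pump_first_frame.cut2] span [Vorbis.L.textLo, Vorbis.L.textHi] side (v_side)
  case call_inv =>
    v_inv
  case pre_1138d3 =>
    -- vorbis_finish_frame's precondition: the layer and the invariant over the pushed return address, W3′ from W3
    have e_rsp : (s_1138d3.reg .rsp).toNat + 8 = (u.reg .rsp).toNat - 120 := by
      rw [w_rsp]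
      u_omega
    have hinv3 : ShadowInv others (((u.reg .rsp).toNat - 120, Vorbis.Frames.vorbis_pump_first_frame) :: frames)
        ((u.reg .rsp).toNat - 120) s_1138d3.mem := by
      rw [w_mem]
      exact hinv2.writeLE _ _ _ (by u_omega) (by u_omega)
    have hsame3 : Mem.SameExcept [⟨(u.reg .rsp).toNat - 128, (u.reg .rsp).toNat - 120⟩, ⟨0xC00000, 0xE00000⟩]
        s_113899r.mem s_1138d3.mem := by
      rw [w_mem]
      u_same
    have hw3' := hw3 (Vorbis.Spec.vorbis_pump_first_frame.s32_ne_zero z hbr_1138a2)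
    refine ⟨⟨?_, hsh.offText⟩, ?_, ?_⟩
    · rw [e_rsp]
      exact hinv3
    · rw [w_rdi]
      exact Vorbis.Spec.vorbis_pump_first_frame.carry_stack_shadow hdec2 hinv2 (by omega) (by omega) hsame3 hinv3
    · rw [w_rdi, w_rsi, w_rdx, w_rcx, w_mem]
      exact Vorbis.Spec.vorbis_pump_first_frame.finish_pre _ he_room he_top hdec2 hw3'
  · -- 0x1138d8 (cut2): vorbis_finish_frame has returned
    v_after_call w_rsp_1138d3 w_mem_1138d3
    -- the stack slots and the footprint, through the second callee's footprint (the arena only)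
    have hs1' : UInt64.ofNat (s_1138d3r.mem.readLE (u.reg .rsp - 8) 8) = u.reg .r12 := by u_frame hs1
    have hs2' : UInt64.ofNat (s_1138d3r.mem.readLE (u.reg .rsp - 16) 8) = u.reg .rbp := by u_frame hs2
    have hs3' : UInt64.ofNat (s_1138d3r.mem.readLE (u.reg .rsp - 24) 8) = u.reg .rbx := by u_frame hs3
    have hs0' : UInt64.ofNat (s_1138d3r.mem.readLE (u.reg .rsp) 8) = ret := by u_frame hs0
    have hsame2 : Mem.SameExcept [⟨(u.reg .rsp).toNat - 4176, (u.reg .rsp).toNat⟩, ⟨A.B, A.B + A.L⟩,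
        ⟨0xC00000, 0xE00000⟩] u.mem s_1138d3r.mem := by
      u_same
    -- the layer after the call: no shadow byte was written by vorbis_finish_frame
    have hinv3 : ShadowInv others (((u.reg .rsp).toNat - 120, Vorbis.Frames.vorbis_pump_first_frame) :: frames)
        ((u.reg .rsp).toNat - 120) s_1138d3.mem := by
      rw [w_mem_1138d3]
      exact hinv2.writeLE _ _ _ (by u_omega) (by u_omega)
    obtain ⟨hun, hdec3, _, _, _⟩ := w_post
    rw [w_rdi_1138d3] at hdec3
    have hinv4 := hinv3.untouched hun
    -- 0x1138d8 `jmp 1138a4`, the epilogue (stb_vorbis_fixed.c:3543), walked to the `ret`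
    u_walk hcode [hμ.vendor] span [Vorbis.L.textLo, Vorbis.L.textHi] side (v_side)
    refine ReachVia.done ?_
    v_returned
    -- the postcondition: the epilogue's two shadow stores over the layer and the invariant after the call
    have e_rsp : (s_1138c3.reg .rsp).toNat = (u.reg .rsp).toNat + 8 := by
      rw [w_rsp]
      u_omega
    show ShadowInv others frames (s_1138c3.reg .rsp).toNat s_1138c3.mem ∧
      DecodeInv others frames len A stored room ysz s_1138c3.mem (u.reg .rdi).toNat
    rw [e_rsp, w_mem]
    exact Vorbis.Spec.vorbis_pump_first_frame.epilogue_post hbdef hb1 hb2 hinv4 hdec3 he_room he_align he_top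
      (Vorbis.Spec.vorbis_pump_first_frame.frames_above hsh.inv)
  · -- the path `res == 0`: 0x1138a4, the epilogue, walked to the `ret`
    refine ReachVia.done ?_
    v_returned
    -- the postcondition: the epilogue's two shadow stores over the layer and the invariant after vorbis_decode_packet
    have e_rsp : (s_1138c3.reg .rsp).toNat = (u.reg .rsp).toNat + 8 := by
      rw [w_rsp]
      u_omega
    show ShadowInv others frames (s_1138c3.reg .rsp).toNat s_1138c3.mem ∧
      DecodeInv others frames len A stored room ysz s_1138c3.mem (u.reg .rdi).toNat
    rw [e_rsp, w_mem]
    exact Vorbis.Spec.vorbis_pump_first_frame.epilogue_post hbdef hb1 hb2 hinv2 hdec2 he_room he_align he_top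
      (Vorbis.Spec.vorbis_pump_first_frame.frames_above hsh.inv)
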